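-- pv_equiv track=rewrite | github.com/mlederbauer/NMRcraft | nmrcraft/data/dataset.py | column_length_to_indices
-- ===== SOURCE A (Python) =====
-- def column_length_to_indices(column_lengths):
--     indices = []
--     start_index = 0
--     for length in column_lengths:
--         if length == 1:
--             indices.append([start_index])
--         else:
--             indices.append(list(range(start_index, start_index + length)))
--         start_index += length
--     return indices
-- ===== SOURCE B (Python) =====
-- def column_length_to_indices(column_lengths):
--     # Pass 1: cumulative segment ends (prefix sums).
--     ends = []
--     total = 0
--     for length in column_lengths:
--         total += length
--         ends.append(total)
--     # Pass 2: derive starts from the prefix table.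
--     starts = [e - l for e, l in zip(ends, column_lengths)]
--     # Pass 3: map each (start, end) pair to its index range.
--     return [list(range(s, e)) for s, e in zip(starts, ends)]
-- ===== Notes on version B (the rewrite author's own statement) =====
-- stated objective: simpler
-- what changed: Replaces the running-accumulator loop with a branch on length==1 by a prefix-sum table of segment ends followed by a comprehension mapping (start,end) pairs to ranges, dropping the redundant special case.
import Mathlib
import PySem

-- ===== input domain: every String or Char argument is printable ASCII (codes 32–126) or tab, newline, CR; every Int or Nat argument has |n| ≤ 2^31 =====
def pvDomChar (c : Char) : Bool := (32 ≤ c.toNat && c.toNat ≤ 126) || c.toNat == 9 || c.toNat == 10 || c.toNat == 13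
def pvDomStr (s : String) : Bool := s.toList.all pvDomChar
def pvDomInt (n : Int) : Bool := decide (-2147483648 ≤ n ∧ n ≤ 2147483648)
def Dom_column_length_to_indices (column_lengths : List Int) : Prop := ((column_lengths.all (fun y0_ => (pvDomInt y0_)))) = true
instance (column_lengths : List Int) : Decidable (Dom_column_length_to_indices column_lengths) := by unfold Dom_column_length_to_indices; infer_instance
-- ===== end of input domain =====

-- B replaces A's running-accumulator loop (with a length==1 special case) by a
-- prefix-sum table of segment ends followed by a map to ranges (simpler decomposition).


-- ===== PORT A =====
-- loop state: (indices, start_index); branch on length == 1 kept as in A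
def column_length_to_indices (column_lengths : List Int) : List (List Int) :=
  (column_lengths.foldl
    (fun (st : List (List Int) × Int) length =>
      if length == 1 then
        (st.1 ++ [[st.2]], st.2 + length)
      else
        (st.1 ++ [PySem.List.pyRange st.2 (st.2 + length) 1], st.2 + length))
    ([], 0)).1

-- ===== PORT B =====
-- pass 1: prefix sums (segment ends)
def clti_ends (column_lengths : List Int) : List Int :=
  (column_lengths.foldl
    (fun (st : List Int × Int) length =>
      (st.1 ++ [st.2 + length], st.2 + length))
    ([], 0)).1

def column_length_to_indices_alt (column_lengths : List Int) : List (List Int) :=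
  let ends := clti_ends column_lengths
  -- pass 2: starts derived from the prefix table
  let starts := (ends.zip column_lengths).map (fun p => p.1 - p.2)
  -- pass 3: map each (start, end) pair to its range
  (starts.zip ends).map (fun p => PySem.List.pyRange p.1 p.2 1)

-- ===== PRECONDITION & SPEC =====
def Spec_column_length_to_indices (column_lengths : List Int) (out : List (List Int)) : Prop := out = column_length_to_indices_alt column_lengths
instance (column_lengths : List Int) (out : List (List Int)) : Decidable (Spec_column_length_to_indices column_lengths out) := by unfold Spec_column_length_to_indices; infer_instance

-- ===== CLAIM (what is proved, stated in full; the proofs are below) =====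
def Claim_equal_column_length_to_indices : Prop := ∀ (column_lengths : List Int), Dom_column_length_to_indices column_lengths → Spec_column_length_to_indices column_lengths (column_length_to_indices column_lengths)

-- ===== LEMMAS AND PROOFS =====

-- reference function: segments starting at s
def clti_go (s : Int) : List Int → List (List Int)
  | [] => []
  | l :: ls => PySem.List.pyRange s (s + l) 1 :: clti_go (s + l) ls

lemma aLoop_eq (ls : List Int) : ∀ (acc : List (List Int)) (s : Int),
    (ls.foldl
      (fun (st : List (List Int) × Int) length =>
        if length == 1 then
          (st.1 ++ [[st.2]], st.2 + length)
        else
          (st.1 ++ [PySem.List.pyRange st.2 (st.2 + length) 1], st.2 + length))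
      (acc, s)).1 = acc ++ clti_go s ls := by
  induction ls with
  | nil => simp [clti_go]
  | cons l ls ih =>
    intro acc s
    rw [List.foldl_cons]
    by_cases h : l = 1
    · subst h
      rw [show (if ((1 : Int) == 1) = true then ((acc, s).1 ++ [[(acc, s).2]], (acc, s).2 + 1)
            else ((acc, s).1 ++ [PySem.List.pyRange (acc, s).2 ((acc, s).2 + 1) 1], (acc, s).2 + 1))
            = (acc ++ [[s]], s + 1) from rfl, ih]
      simp [clti_go]
    · rw [show (if (l == 1) = true then ((acc, s).1 ++ [[(acc, s).2]], (acc, s).2 + l)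
            else ((acc, s).1 ++ [PySem.List.pyRange (acc, s).2 ((acc, s).2 + l) 1], (acc, s).2 + l))
            = (acc ++ [PySem.List.pyRange s (s + l) 1], s + l) from by simp [h], ih]
      simp [clti_go]

-- cumulative ends, recursively
def clti_endsGo (s : Int) : List Int → List Int
  | [] => []
  | l :: ls => (s + l) :: clti_endsGo (s + l) ls

lemma bEnds_go (ls : List Int) : ∀ (acc : List Int) (s : Int),
    (ls.foldl
      (fun (st : List Int × Int) length =>
        (st.1 ++ [st.2 + length], st.2 + length))
      (acc, s)).1 = acc ++ clti_endsGo s ls := by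
  induction ls with
  | nil => simp [clti_endsGo]
  | cons l ls ih => intro acc s; simp [clti_endsGo, ih]

lemma b_go (ls : List Int) : ∀ (s : Int),
    ((((clti_endsGo s ls).zip ls).map (fun p => p.1 - p.2)).zip (clti_endsGo s ls)).map
      (fun p => PySem.List.pyRange p.1 p.2 1) = clti_go s ls := by
  induction ls with
  | nil => simp [clti_endsGo, clti_go]
  | cons l ls ih =>
    intro s
    simp only [clti_endsGo, clti_go, List.zip_cons_cons, List.map_cons]
    rw [ih]
    norm_num

-- ===== VERDICT (by name: the statement is the Claim_ definition above) =====
theorem column_length_to_indices_spec : Claim_equal_column_length_to_indices := by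
  intro ls _
  show column_length_to_indices ls = column_length_to_indices_alt ls
  unfold column_length_to_indices column_length_to_indices_alt clti_ends
  rw [aLoop_eq, bEnds_go]
  simpa using (b_go ls 0).symm
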